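-- pv_equiv track=rewrite | github.com/Bavlyy-Ramy/ECLAT_Algorithm | main.py | gen_itemsets
-- ===== SOURCE A (Python) =====
-- def gen_itemsets(vertical, freq, min_support_count):
--     if len(vertical) <= 1:
--         return freq
--
--     new_vertical = {}
--     vertical_items = list(vertical.keys())
--
--     for i in range(len(vertical_items)):
--         for j in range(i + 1, len(vertical_items)):
--             curr_item = vertical_items[i]
--             next_item = vertical_items[j]
--             curr_tids = vertical[curr_item]
--             next_tids = vertical[next_item]
--
--
--             curr_items = curr_item.split(',')
--             next_items = next_item.split(',')
--
--             # Apriori principle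
--             if len(curr_items) == len(next_items) and curr_items[:-1] == next_items[:-1]:
--                 new_items = curr_items + [next_items[-1]]
--                 new_item = ','.join(sorted(new_items))
--
--                 #intersection
--                 new_tids = curr_tids.intersection(next_tids)
--
--                 if len(new_tids) >= min_support_count:
--                     freq[new_item] = new_tids
--                     new_vertical[new_item] = new_tids
--
--     return gen_itemsets(new_vertical, freq, min_support_count)
-- ===== SOURCE B (Python) =====
-- def gen_itemsets(vertical, freq, min_support_count):
--     # Iterative level loop; each level indexes items by (length, prefix) so only
--     # same-prefix candidates are paired, instead of comparing all O(n^2) pairs.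
--     while len(vertical) > 1:
--         items = list(vertical.keys())
--         parts = [it.split(',') for it in items]
--         groups = {}
--         rank = []
--         for ps in parts:
--             g = groups.setdefault((len(ps), tuple(ps[:-1])), [])
--             rank.append(len(g))
--             g.append(len(rank) - 1)
--         new_vertical = {}
--         for i in range(len(items)):
--             pi = parts[i]
--             g = groups[(len(pi), tuple(pi[:-1]))]
--             for j in g[rank[i] + 1:]:
--                 pj = parts[j]
--                 new_item = ','.join(sorted(pi + [pj[-1]]))
--                 new_tids = vertical[items[i]] & vertical[items[j]]
--                 if len(new_tids) >= min_support_count: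
--                     freq[new_item] = new_tids
--                     new_vertical[new_item] = new_tids
--         vertical = new_vertical
--     return freq
-- ===== Notes on version B (the rewrite author's own statement) =====
-- stated objective: alternative
-- what changed: Replaces A's recursion with per-level all-pairs prefix comparisons by an iterative level loop that indexes items once by (part-count, prefix) into a dict of index lists plus a rank array, then pairs each item only with the later members of its own group, reproducing A's exact pair order and dict insertion order.
import Mathlib
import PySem

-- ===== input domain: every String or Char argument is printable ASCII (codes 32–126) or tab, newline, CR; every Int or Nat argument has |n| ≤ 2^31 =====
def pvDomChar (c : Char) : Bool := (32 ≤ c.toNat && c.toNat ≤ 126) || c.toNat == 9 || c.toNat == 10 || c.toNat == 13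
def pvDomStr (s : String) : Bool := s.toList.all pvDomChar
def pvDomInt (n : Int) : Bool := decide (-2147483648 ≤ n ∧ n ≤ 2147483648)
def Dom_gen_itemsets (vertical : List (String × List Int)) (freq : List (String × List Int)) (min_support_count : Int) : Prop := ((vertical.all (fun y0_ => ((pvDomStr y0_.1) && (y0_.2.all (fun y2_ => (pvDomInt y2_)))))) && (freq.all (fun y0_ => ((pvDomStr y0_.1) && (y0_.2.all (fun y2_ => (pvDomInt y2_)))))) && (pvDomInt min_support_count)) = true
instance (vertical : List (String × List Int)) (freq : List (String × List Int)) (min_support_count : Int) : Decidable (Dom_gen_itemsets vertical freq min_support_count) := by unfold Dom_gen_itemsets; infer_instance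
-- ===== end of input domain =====

-- B replaces A's recursive per-level all-pairs prefix scan by an iterative level loop grouping
-- items once by (part-count, prefix) and pairing only within a group, in A's exact order (objective: alternative).
-- Both Pythons mutate the caller's `freq` dict identically; the equivalence proved is about the return value.
-- Both ports carry a fuel argument computed once at entry — a totality guard only (the Python
-- recursion/loop depth is bounded; the guard never changes the value on inputs the Pythons finish on).
def pvFuel (vertical : List (String × List Int)) : Nat :=
  let t := vertical.foldl (fun a p => a + p.1.length + 2) 2
  t * t + 2

-- ===== PORT A =====
-- inner-loop body of A for the pair (i, j) (the `if` is Python's Apriori test)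
def pvBodyA (vertical : PySem.Dict String (List Int)) (vertical_items : List String) (min_support_count : Int) (st : PySem.Dict String (List Int) × PySem.Dict String (List Int)) (i j : Int) : PySem.Dict String (List Int) × PySem.Dict String (List Int) :=
  let curr_item := PySem.List.pyGetD vertical_items i ""
  let next_item := PySem.List.pyGetD vertical_items j ""
  let curr_tids := PySem.Dict.getD vertical curr_item []
  let next_tids := PySem.Dict.getD vertical next_item []
  let curr_items := (PySem.Str.split? curr_item ",").getD []
  let next_items := (PySem.Str.split? next_item ",").getD []
  -- curr_items[:-1] == next_items[:-1]: lst[:-1] is dropLast, exact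
  if curr_items.length == next_items.length && curr_items.dropLast == next_items.dropLast then
    -- next_items[-1]: split output is never empty, so the default is never used
    let new_items := curr_items ++ [PySem.List.pyGetD next_items (-1) ""]
    let new_item := PySem.Str.join "," (PySem.List.sorted new_items (fun x => x) false)
    let new_tids := PySem.Set.inter curr_tids next_tids
    if min_support_count ≤ PySem.List.len new_tids then
      (PySem.Dict.insert st.1 new_item new_tids, PySem.Dict.insert st.2 new_item new_tids)
    else st
  else st

-- one level of A: the nested `for i … for j in range(i+1, …)` building (new_vertical, freq)
def pvLevelA (vertical freq : PySem.Dict String (List Int)) (min_support_count : Int) : PySem.Dict String (List Int) × PySem.Dict String (List Int) :=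
  let vertical_items := PySem.Dict.keys vertical
  let n : Int := PySem.List.len vertical_items
  (PySem.List.pyRange 0 n 1).foldl (fun st i =>
      (PySem.List.pyRange (i+1) n 1).foldl (fun st j =>
        pvBodyA vertical vertical_items min_support_count st i j) st)
    ((PySem.Dict.empty : PySem.Dict String (List Int)), freq)

def gen_itemsetsA : Nat → PySem.Dict String (List Int) → PySem.Dict String (List Int) → Int → PySem.Dict String (List Int)
  | 0, _, freq, _ => freq            -- fuel exhausted (never reached for pvFuel)
  | fuel+1, vertical, freq, min_support_count =>
    if PySem.Dict.size vertical ≤ 1 then freq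
    else
      let st := pvLevelA vertical freq min_support_count
      gen_itemsetsA fuel st.1 st.2 min_support_count

def gen_itemsets (vertical : List (String × List Int)) (freq : List (String × List Int)) (min_support_count : Int) : List (String × List Int) :=
  (gen_itemsetsA (pvFuel vertical) (PySem.Dict.mk vertical) (PySem.Dict.mk freq) min_support_count).items

-- ===== PORT B =====
-- one step of B's grouping pass: st = (groups so far, rank list so far); the index of the
-- current item is the current length of the rank list
def pvGrpStep (st : PySem.Dict (Nat × List String) (List Int) × List Int) (ps : List String) : PySem.Dict (Nat × List String) (List Int) × List Int :=
  let k := (ps.length, ps.dropLast)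
  let g := PySem.Dict.getD st.1 k []
  (PySem.Dict.insert st.1 k (g ++ [PySem.List.len st.2]), st.2 ++ [PySem.List.len g])

-- B's grouping pass: groups[(len ps, ps[:-1])] = indices with that key, rank[idx] = position inside its group
def pvGrpB (parts : List (List String)) : PySem.Dict (Nat × List String) (List Int) × List Int :=
  parts.foldl pvGrpStep ((PySem.Dict.empty : PySem.Dict (Nat × List String) (List Int)), ([] : List Int))

-- inner-loop body of B for the pair (i, j): j is taken from i's group, no test needed
def pvBodyB (vertical : PySem.Dict String (List Int)) (items : List String) (parts : List (List String)) (min_support_count : Int) (st : PySem.Dict String (List Int) × PySem.Dict String (List Int)) (i j : Int) : PySem.Dict String (List Int) × PySem.Dict String (List Int) :=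
  let pi := PySem.List.pyGetD parts i []
  let pj := PySem.List.pyGetD parts j []
  -- pj[-1]: split output is never empty, so the default is never used
  let new_item := PySem.Str.join "," (PySem.List.sorted (pi ++ [PySem.List.pyGetD pj (-1) ""]) (fun x => x) false)
  let new_tids := PySem.Set.inter (PySem.Dict.getD vertical (PySem.List.pyGetD items i "") [])
                                  (PySem.Dict.getD vertical (PySem.List.pyGetD items j "") [])
  if min_support_count ≤ PySem.List.len new_tids then
    (PySem.Dict.insert st.1 new_item new_tids, PySem.Dict.insert st.2 new_item new_tids)
  else st

-- one level of B: group once, then pair each i only with the later members of its group (g[rank[i]+1:])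
def pvLevelB (vertical freq : PySem.Dict String (List Int)) (min_support_count : Int) : PySem.Dict String (List Int) × PySem.Dict String (List Int) :=
  let items := PySem.Dict.keys vertical
  let parts := items.map (fun it => (PySem.Str.split? it ",").getD [])
  let gr := pvGrpB parts
  let n : Int := PySem.List.len items
  (PySem.List.pyRange 0 n 1).foldl (fun st i =>
      let pi := PySem.List.pyGetD parts i []
      let g := PySem.Dict.getD gr.1 (pi.length, pi.dropLast) []
      let tail := PySem.List.slice g (some (PySem.List.pyGetD gr.2 i 0 + 1)) none   -- g[rank[i]+1:]
      tail.foldl (fun st j => pvBodyB vertical items parts min_support_count st i j) st)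
    ((PySem.Dict.empty : PySem.Dict String (List Int)), freq)

def gen_itemsetsB : Nat → PySem.Dict String (List Int) → PySem.Dict String (List Int) → Int → PySem.Dict String (List Int)
  | 0, _, freq, _ => freq            -- fuel exhausted (never reached for pvFuel)
  | fuel+1, vertical, freq, min_support_count =>
    if PySem.Dict.size vertical ≤ 1 then freq
    else
      let st := pvLevelB vertical freq min_support_count
      gen_itemsetsB fuel st.1 st.2 min_support_count

def gen_itemsets_alt (vertical : List (String × List Int)) (freq : List (String × List Int)) (min_support_count : Int) : List (String × List Int) :=
  (gen_itemsetsB (pvFuel vertical) (PySem.Dict.mk vertical) (PySem.Dict.mk freq) min_support_count).items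

-- ===== PRECONDITION & SPEC =====
def Spec_gen_itemsets (vertical : List (String × List Int)) (freq : List (String × List Int)) (min_support_count : Int) (out : List (String × List Int)) : Prop := out = gen_itemsets_alt vertical freq min_support_count
instance (vertical : List (String × List Int)) (freq : List (String × List Int)) (min_support_count : Int) (out : List (String × List Int)) : Decidable (Spec_gen_itemsets vertical freq min_support_count out) := by unfold Spec_gen_itemsets; infer_instance

-- ===== CLAIM (what is proved, stated in full; the proofs are below) =====
def Claim_equal_gen_itemsets : Prop := ∀ (vertical : List (String × List Int)) (freq : List (String × List Int)) (min_support_count : Int), Dom_gen_itemsets vertical freq min_support_count → Spec_gen_itemsets vertical freq min_support_count (gen_itemsets vertical freq min_support_count)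

-- ===== LEMMAS AND PROOFS =====

-- the (part-count, prefix) key of index j, read off the parts list
def pvKeyP (ps : List (List String)) (j : Int) : Nat × List String :=
  ((PySem.List.pyGetD ps j []).length, (PySem.List.pyGetD ps j []).dropLast)

theorem pvPartsGetD (items : List String) (f : String → List String) (i : Int)
    (h0 : 0 ≤ i) (h1 : i < (items.length : Int)) :
    PySem.List.pyGetD (items.map f) i [] = f (PySem.List.pyGetD items i "") := by
  rw [PySem.List.pyGetD_eq_getElem _ [] h0 (by simpa using h1),
      PySem.List.pyGetD_eq_getElem _ "" h0 h1, List.getElem_map]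

theorem pvKeyP_append_lt (ps : List (List String)) (p : List String) (j : Int)
    (h0 : 0 ≤ j) (h1 : j < (ps.length : Int)) :
    pvKeyP (ps ++ [p]) j = pvKeyP ps j := by
  unfold pvKeyP
  rw [PySem.List.pyGetD_eq_getElem _ [] h0 (by simp; omega),
      PySem.List.pyGetD_eq_getElem _ [] h0 h1,
      List.getElem_append_left (by omega)]

theorem pvKeyP_append_self (ps : List (List String)) (p : List String) :
    pvKeyP (ps ++ [p]) (ps.length : Int) = (p.length, p.dropLast) := by
  unfold pvKeyP
  rw [PySem.List.pyGetD_eq_getElem _ [] (by positivity) (by simp)]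
  simp

-- the grouping pass computes: groups[k] = indices with key k (in order), rank[a] = #earlier same-key indices
theorem pvGrp_spec (ps : List (List String)) :
    (pvGrpB ps).2.length = ps.length ∧
    (∀ k : Nat × List String, PySem.Dict.getD (pvGrpB ps).1 k [] =
      (PySem.List.pyRange 0 (ps.length : Int) 1).filter (fun j => pvKeyP ps j == k)) ∧
    (∀ a : Nat, a < ps.length → PySem.List.pyGetD (pvGrpB ps).2 (a : Int) 0 =
      (((PySem.List.pyRange 0 (a : Int) 1).filter (fun j => pvKeyP ps j == pvKeyP ps (a : Int))).length : Int)) := by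
  induction ps using List.reverseRecOn with
  | nil =>
    refine ⟨rfl, ?_, ?_⟩
    · intro k
      simp [pvGrpB, PySem.List.pyRange_one_eq_nil (by norm_num : (0:Int) ≤ 0), PySem.Dict.getD_empty]
    · intro a ha; simp at ha
  | append_singleton ps p ih =>
    obtain ⟨ha, hb, hc⟩ := ih
    have hfold : pvGrpB (ps ++ [p]) = pvGrpStep (pvGrpB ps) p := by
      simp [pvGrpB, List.foldl_append]
    have hkp : pvKeyP (ps ++ [p]) (ps.length : Int) = (p.length, p.dropLast) :=
      pvKeyP_append_self ps p
    have hfiltcongr : ∀ (m : Int) (k : Nat × List String), 0 ≤ m → m ≤ (ps.length : Int) →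
        (PySem.List.pyRange 0 m 1).filter (fun j => pvKeyP (ps ++ [p]) j == k) =
        (PySem.List.pyRange 0 m 1).filter (fun j => pvKeyP ps j == k) := by
      intro m k hm0 hm
      apply List.filter_congr
      intro j hj
      obtain ⟨hj0, hjm⟩ := PySem.List.mem_pyRange_one.mp hj
      rw [pvKeyP_append_lt ps p j hj0 (by omega)]
    refine ⟨?_, ?_, ?_⟩
    · rw [hfold]; simp [pvGrpStep, ha]
    · intro k
      rw [hfold]
      show PySem.Dict.getD (PySem.Dict.insert (pvGrpB ps).1 (p.length, p.dropLast)
            (PySem.Dict.getD (pvGrpB ps).1 (p.length, p.dropLast) [] ++ [PySem.List.len (pvGrpB ps).2])) k [] = _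
      have hlen1 : ((ps ++ [p]).length : Int) = (ps.length : Int) + 1 := by simp
      rw [hlen1, PySem.List.pyRange_one_succ_right (by positivity), List.filter_append,
          hfiltcongr (ps.length : Int) k (by positivity) le_rfl]
      rw [PySem.Dict.getD_insert]
      by_cases hk : k = (p.length, p.dropLast)
      · subst hk
        rw [if_pos rfl, hb]
        congr 1
        simp [hkp, PySem.List.len_eq, ha]
      · rw [if_neg hk, hb]
        have : (fun j => pvKeyP (ps ++ [p]) j == k) (ps.length : Int) = false := by
          simp only [hkp]; exact beq_eq_false_iff_ne.mpr (fun h => hk h.symm)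
        simp [this]
    · intro a haa
      rw [hfold]
      show PySem.List.pyGetD ((pvGrpB ps).2 ++ [PySem.List.len (PySem.Dict.getD (pvGrpB ps).1 (p.length, p.dropLast) [])]) (a : Int) 0 = _
      rcases Nat.lt_or_ge a ps.length with hlt | hge
      · -- old index: both sides unchanged
        rw [PySem.List.pyGetD_eq_getElem _ 0 (by positivity) (by simp [ha]; omega),
            List.getElem_append_left (by omega)]
        have h1 := hc a hlt
        rw [PySem.List.pyGetD_eq_getElem _ 0 (by positivity) (by simp [ha]; omega)] at h1
        rw [pvKeyP_append_lt ps p (a : Int) (by positivity) (by exact_mod_cast hlt),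
            hfiltcongr (a : Int) _ (by positivity) (by exact_mod_cast hlt.le)]
        exact h1
      · -- the new index a = ps.length
        have haeq : a = ps.length := by simp at haa; omega
        subst haeq
        rw [PySem.List.pyGetD_eq_getElem _ 0 (by positivity) (by simp [ha])]
        simp only [Int.toNat_natCast]
        rw [List.getElem_append_right (by omega), hkp,
            hfiltcongr (ps.length : Int) _ (by positivity) le_rfl]
        simp only [ha, Nat.sub_self, List.getElem_singleton]
        rw [hb, PySem.List.len_eq]
  -- end pvGrp_spec

theorem pvInner_eq (v : PySem.Dict String (List Int)) (m : Int) (items : List String)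
    (st : PySem.Dict String (List Int) × PySem.Dict String (List Int)) (i : Int)
    (h0 : 0 ≤ i) (h1 : i < (items.length : Int)) :
    (PySem.List.slice
        (PySem.Dict.getD (pvGrpB (items.map (fun it => (PySem.Str.split? it ",").getD []))).1
          ((PySem.List.pyGetD (items.map (fun it => (PySem.Str.split? it ",").getD [])) i []).length,
           (PySem.List.pyGetD (items.map (fun it => (PySem.Str.split? it ",").getD [])) i []).dropLast) [])
        (some (PySem.List.pyGetD (pvGrpB (items.map (fun it => (PySem.Str.split? it ",").getD []))).2 i 0 + 1)) none).foldl
      (fun st j => pvBodyB v items (items.map (fun it => (PySem.Str.split? it ",").getD [])) m st i j) st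
    = (PySem.List.pyRange (i+1) (items.length : Int) 1).foldl
        (fun st j => pvBodyA v items m st i j) st := by
  set parts := items.map (fun it => (PySem.Str.split? it ",").getD []) with hpartsdef
  obtain ⟨ha, hb, hc⟩ := pvGrp_spec parts
  have hplen : parts.length = items.length := by simp [hpartsdef]
  obtain ⟨a, rfl⟩ : ∃ a : Nat, i = (a : Int) := ⟨i.toNat, (Int.toNat_of_nonneg h0).symm⟩
  have halt : a < items.length := by exact_mod_cast h1
  have hgets : ∀ (j : Int), 0 ≤ j → j < (items.length : Int) →
      PySem.List.pyGetD parts j [] = (PySem.Str.split? (PySem.List.pyGetD items j "") ",").getD [] := by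
    intro j hj0 hj1
    exact pvPartsGetD items _ j hj0 hj1
  -- name the group key and the rank value
  rw [show ((PySem.List.pyGetD parts (a : Int) []).length, (PySem.List.pyGetD parts (a : Int) []).dropLast)
        = pvKeyP parts (a : Int) from rfl,
      hb (pvKeyP parts (a : Int)), hc a (hplen ▸ halt)]
  -- the slice g[rank+1:] keeps exactly the same-key indices after a
  have hsplit : (PySem.List.pyRange 0 (parts.length : Int) 1).filter (fun j => pvKeyP parts j == pvKeyP parts (a : Int))
      = (((PySem.List.pyRange 0 (a : Int) 1).filter (fun j => pvKeyP parts j == pvKeyP parts (a : Int)) ++ [(a : Int)])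
         ++ (PySem.List.pyRange ((a : Int)+1) (parts.length : Int) 1).filter (fun j => pvKeyP parts j == pvKeyP parts (a : Int))) := by
    rw [PySem.List.pyRange_one_append 0 ((a : Int)+1) (parts.length : Int) (by positivity)
          (by rw [hplen]; exact_mod_cast halt),
        PySem.List.pyRange_one_succ_right (by positivity), List.filter_append, List.filter_append]
    simp
  rw [hsplit]
  set F0 := (PySem.List.pyRange 0 (a : Int) 1).filter (fun j => pvKeyP parts j == pvKeyP parts (a : Int)) with hF0
  set F1 := (PySem.List.pyRange ((a : Int)+1) (parts.length : Int) 1).filter (fun j => pvKeyP parts j == pvKeyP parts (a : Int)) with hF1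
  have hslice : PySem.List.slice ((F0 ++ [(a : Int)]) ++ F1) (some ((F0.length : Int) + 1)) none = F1 := by
    rw [show ((F0.length : Int) + 1) = (((F0.length + 1 : Nat)) : Int) by push_cast; ring,
        PySem.List.slice_from _ (by positivity), Int.toNat_natCast,
        show F0.length + 1 = (F0 ++ [(a : Int)]).length by simp, List.drop_left]
  rw [hslice, hF1, List.foldl_filter, hplen]
  apply PySem.List.foldl_congr_mem
  intro st j hj
  obtain ⟨hj1, hj2⟩ := PySem.List.mem_pyRange_one.mp hj
  have hj0 : (0 : Int) ≤ j := le_trans (by positivity) hj1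
  -- both bodies coincide on in-range pairs
  show (if pvKeyP parts j == pvKeyP parts (a : Int) then pvBodyB v items parts m st (a : Int) j else st)
      = pvBodyA v items m st (a : Int) j
  unfold pvBodyA pvBodyB pvKeyP
  rw [hgets (a : Int) h0 h1, hgets j hj0 hj2]
  set ci := (PySem.Str.split? (PySem.List.pyGetD items (a : Int) "") ",").getD [] with hci
  set cj := (PySem.Str.split? (PySem.List.pyGetD items j "") ",").getD [] with hcj
  have hcond : ((cj.length, cj.dropLast) == (ci.length, ci.dropLast))
      = (ci.length == cj.length && ci.dropLast == cj.dropLast) := by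
    rw [Bool.eq_iff_iff]
    simp only [beq_iff_eq, Prod.mk.injEq, Bool.and_eq_true]
    constructor
    · rintro ⟨x, y⟩; exact ⟨x.symm, y.symm⟩
    · rintro ⟨x, y⟩; exact ⟨x.symm, y.symm⟩
  rw [hcond]

theorem pvLevel_eq (v f : PySem.Dict String (List Int)) (m : Int) :
    pvLevelA v f m = pvLevelB v f m := by
  unfold pvLevelA pvLevelB
  simp only [PySem.List.len_eq]
  apply (PySem.List.foldl_congr_mem _ _ _ _ _).symm
  intro st i hi
  obtain ⟨hi0, hin⟩ := PySem.List.mem_pyRange_one.mp hi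
  exact pvInner_eq v m (PySem.Dict.keys v) st i hi0 (by simpa using hin)

theorem pvMain : ∀ (fuel : Nat) (v f : PySem.Dict String (List Int)) (m : Int),
    gen_itemsetsA fuel v f m = gen_itemsetsB fuel v f m := by
  intro fuel
  induction fuel with
  | zero => intro v f m; rfl
  | succ n ih =>
    intro v f m
    show (if PySem.Dict.size v ≤ 1 then f
          else gen_itemsetsA n (pvLevelA v f m).1 (pvLevelA v f m).2 m) =
         (if PySem.Dict.size v ≤ 1 then f
          else gen_itemsetsB n (pvLevelB v f m).1 (pvLevelB v f m).2 m)
    split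
    · rfl
    · rw [pvLevel_eq, ih]

-- ===== VERDICT (by name: the statement is the Claim_ definition above) =====
theorem gen_itemsets_spec : Claim_equal_gen_itemsets := by
  intro v f m _
  unfold Spec_gen_itemsets gen_itemsets gen_itemsets_alt
  rw [pvMain]
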